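-- pv_equiv track=rewrite | github.com/bismaysarangi/dsa-in-python | Interviews/Spikewell/question_marks.py | question_marks
-- ===== SOURCE A (Python) =====
-- def question_marks(strArr):
--     question_count = 0
--     prev_digit = None
--     found_valid_pair = False
--
--     for char in strArr:
--         if char.isdigit():
--             current_digit = int(char)
--             if prev_digit is not None:
--                 if current_digit + prev_digit == 10:
--                     if question_count != 3:
--                         return "false"
--                     found_valid_pair = True
--             prev_digit = current_digit
--             question_count = 0
--
--         elif char == '?':
--             question_count += 1
--
--     return "true" if found_valid_pair else "false"
-- ===== SOURCE B (Python) =====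
-- def question_marks(strArr):
--     # Tokenize first: (number of '?' since previous digit, digit value) for each digit.
--     tokens = []
--     q = 0
--     for c in strArr:
--         if c.isdigit():
--             tokens.append((q, int(c)))
--             q = 0
--         elif c == '?':
--             q += 1
--     # Judge all consecutive digit pairs summing to 10 in bulk.
--     gaps = [g2 for (_, v1), (g2, v2) in zip(tokens, tokens[1:]) if v1 + v2 == 10]
--     return "true" if gaps and all(g == 3 for g in gaps) else "false"
-- ===== Notes on version B (the rewrite author's own statement) =====
-- stated objective: alternative
-- what changed: Replaces A's single stateful scan with early return and prev/found flags by a two-phase tokenize-then-judge: first materialize the list of (question-run, digit) tokens, then decide in bulk over zipped consecutive token pairs with filter/all and no early exit.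
import Mathlib
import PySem

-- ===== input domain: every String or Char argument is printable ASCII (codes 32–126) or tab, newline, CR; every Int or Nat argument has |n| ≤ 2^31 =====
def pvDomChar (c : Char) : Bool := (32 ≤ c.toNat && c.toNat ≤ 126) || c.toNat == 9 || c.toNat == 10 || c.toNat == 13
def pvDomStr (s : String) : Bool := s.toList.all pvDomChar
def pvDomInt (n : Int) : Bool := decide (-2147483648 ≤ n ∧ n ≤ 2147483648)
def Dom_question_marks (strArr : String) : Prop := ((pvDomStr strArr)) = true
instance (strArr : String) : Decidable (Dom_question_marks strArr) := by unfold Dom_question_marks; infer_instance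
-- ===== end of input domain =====

-- B replaces A's early-return stateful scan by tokenize-then-judge (no speed claim: same O(n)).

-- ===== PORT A =====
-- int(c) on a digit char: exact for '0'..'9'
def pvDigitVal (c : Char) : Int := (c.toNat : Int) - 48

def qmLoopA : List Char → Int → Option Int → Bool → String
  | [], _, _, found => if found then "true" else "false"
  | c :: rest, qc, prev, found =>
    if PySem.Chars.isdigit c then
      let v := pvDigitVal c
      match prev with
      | some p =>
        if p + v = 10 then
          if qc ≠ 3 then "false" else qmLoopA rest 0 (some v) true
        else qmLoopA rest 0 (some v) found
      | none => qmLoopA rest 0 (some v) found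
    else if c = '?' then qmLoopA rest (qc + 1) prev found
    else qmLoopA rest qc prev found

def question_marks (strArr : String) : String :=
  qmLoopA strArr.toList 0 none false

-- ===== PORT B =====
def qmTokens : List Char → Int → List (Int × Int)
  | [], _ => []
  | c :: rest, q =>
    if PySem.Chars.isdigit c then (q, pvDigitVal c) :: qmTokens rest 0
    else if c = '?' then qmTokens rest (q + 1)
    else qmTokens rest q

def question_marks_alt (strArr : String) : String :=
  let tokens := qmTokens strArr.toList 0
  let gaps := ((tokens.zip tokens.tail).filter (fun p => p.1.2 + p.2.2 = 10)).map
      (fun p => p.2.1)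
  if gaps ≠ [] ∧ gaps.all (fun g => g = 3) then "true" else "false"

-- ===== PRECONDITION & SPEC =====
def Spec_question_marks (strArr : String) (out : String) : Prop := out = question_marks_alt strArr
instance (strArr : String) (out : String) : Decidable (Spec_question_marks strArr out) := by unfold Spec_question_marks; infer_instance

-- ===== CLAIM (what is proved, stated in full; the proofs are below) =====
def Claim_equal_question_marks : Prop := ∀ (strArr : String), Dom_question_marks strArr → Spec_question_marks strArr (question_marks strArr)

-- ===== LEMMAS AND PROOFS =====

-- A's loop re-expressed over the token list
def qmJudge : List (Int × Int) → Option Int → Bool → String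
  | [], _, found => if found then "true" else "false"
  | (g, v) :: rest, prev, found =>
    match prev with
    | none => qmJudge rest (some v) found
    | some p =>
      if p + v = 10 then
        if g ≠ 3 then "false" else qmJudge rest (some v) true
      else qmJudge rest (some v) found

-- the gaps of all summing-10 consecutive pairs, with an optional pending previous digit
def qmGaps : Option Int → List (Int × Int) → List Int
  | _, [] => []
  | none, (_, v) :: rest => qmGaps (some v) rest
  | some p, (g, v) :: rest => (if p + v = 10 then [g] else []) ++ qmGaps (some v) rest

theorem qmLoopA_eq_judge (cs : List Char) :
    ∀ (q : Int) (prev : Option Int) (found : Bool),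
      qmLoopA cs q prev found = qmJudge (qmTokens cs q) prev found := by
  induction cs with
  | nil => intro q prev found; rfl
  | cons c rest ih =>
    intro q prev found
    simp only [qmLoopA, qmTokens]
    by_cases hd : PySem.Chars.isdigit c
    · simp only [hd, if_true]
      cases prev with
      | none => simp [qmJudge, ih]
      | some p =>
        by_cases hs : p + pvDigitVal c = 10
        · by_cases hq : q ≠ 3 <;> simp [qmJudge, hs, hq, ih]
        · simp [qmJudge, hs, ih]
    · simp only [if_neg hd]
      by_cases hc : c = '?' <;> simp [hc, ih]

theorem qmJudge_eq_gaps (ts : List (Int × Int)) :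
    ∀ (prev : Option Int) (found : Bool),
      qmJudge ts prev found =
        if (qmGaps prev ts).all (fun g => g = 3) then
          (if found || decide (qmGaps prev ts ≠ []) then "true" else "false")
        else "false" := by
  induction ts with
  | nil => intro prev found; cases prev <;> cases found <;> rfl
  | cons t rest ih =>
    intro prev found
    obtain ⟨g, v⟩ := t
    cases prev with
    | none => simpa [qmJudge, qmGaps] using ih (some v) found
    | some p =>
      by_cases hs : p + v = 10
      · by_cases hg : g = 3
        · simp [qmJudge, qmGaps, hs, hg, ih (some v) true]
        · simp [qmJudge, qmGaps, hs, hg]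
      · simpa [qmJudge, qmGaps, hs] using ih (some v) found

theorem gaps_eq_zipGaps (ts : List (Int × Int)) :
    ∀ (g0 p : Int),
      qmGaps (some p) ts =
        ((((g0, p) :: ts).zip ts).filter (fun x => x.1.2 + x.2.2 = 10)).map
          (fun x => x.2.1) := by
  induction ts with
  | nil => intro g0 p; rfl
  | cons t rest ih =>
    intro g0 p
    obtain ⟨g, v⟩ := t
    by_cases hs : p + v = 10 <;>
      simp [qmGaps, List.zip, hs, ih g v]

theorem gaps_none_eq (ts : List (Int × Int)) :
    qmGaps none ts =
      ((ts.zip ts.tail).filter (fun x => x.1.2 + x.2.2 = 10)).map (fun x => x.2.1) := by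
  cases ts with
  | nil => rfl
  | cons t rest =>
    obtain ⟨g, v⟩ := t
    simpa [qmGaps] using gaps_eq_zipGaps rest g v

theorem qm_final (gs : List Int) :
    (if (gs.all fun g => g = 3) then (if false || decide (gs ≠ []) then "true" else "false")
      else "false")
      = if gs ≠ [] ∧ (gs.all fun g => g = 3) then "true" else "false" := by
  by_cases hall : (gs.all fun g => g = 3) = true
  · rw [if_pos hall]
    rcases eq_or_ne gs [] with h | h
    · subst h; simp
    · rw [if_pos (⟨h, by simpa using hall⟩ : _ ∧ _)]; simp [h]
  · rw [if_neg hall, if_neg (fun hc => hall (by simpa using hc.2))]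

-- ===== VERDICT (by name: the statement is the Claim_ definition above) =====
theorem question_marks_spec : Claim_equal_question_marks := by
  intro strArr _
  unfold Spec_question_marks question_marks question_marks_alt
  rw [qmLoopA_eq_judge, qmJudge_eq_gaps, gaps_none_eq]
  exact qm_final _
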